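-- pv_equiv track=rewrite | github.com/SebastianCB-dev/BDI2-ML | model_word2vec_service.py | getMaxBeck7Items
-- ===== SOURCE A (Python) =====
-- def getMaxBeck7Items(array):
--   """
--   Toma una matriz de números y devuelve una matriz de números.
--
--   :param array: el conjunto de resultados del inventario de depresión de beck
--   :return: el valor máximo de cada grupo de 7 artículos.
--   """
--   results_beck = [0, 1, 1, 2, 2, 3, 3]
--   results = []
--   for index in range(0, len(array), 7):
--     item = array[index: index + 7]
--     mayor = 0
--     mayor_idx = 0
--     for index, result in enumerate(item):
--       if result > mayor:
--         mayor = result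
--         mayor_idx = results_beck[index]
--     results.append(mayor_idx)
--   return results
-- ===== SOURCE B (Python) =====
-- def _score(group):
--   """Mapped value for one (nonempty, <=7 item) group: beck-mapped position of
--   the first maximum if it is positive, else 0."""
--   results_beck = [0, 1, 1, 2, 2, 3, 3]
--   m = max(group)
--   return results_beck[group.index(m)] if m > 0 else 0
--
-- def getMaxBeck7Items(array):
--   """Same result as A. Different decomposition: one flat pass over the elements
--   accumulating a 7-item buffer (no index arithmetic), flushing each full buffer
--   - and the trailing partial one - through max() then .index()."""
--   results = []
--   group = []
--   for value in array:
--     group.append(value)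
--     if len(group) == 7:
--       results.append(_score(group))
--       group = []
--   if group:
--     results.append(_score(group))
--   return results
-- ===== Notes on version B (the rewrite author's own statement) =====
-- stated objective: alternative
-- what changed: A's index-stepped outer loop (range(0,len,7)) with a combined running-max/mapped-index inner scan per slice is replaced by one flat pass over the elements accumulating a 7-item buffer, flushing each full buffer and the trailing partial one through max() then group.index(), keeping the m > 0 guard.
import Mathlib
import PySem

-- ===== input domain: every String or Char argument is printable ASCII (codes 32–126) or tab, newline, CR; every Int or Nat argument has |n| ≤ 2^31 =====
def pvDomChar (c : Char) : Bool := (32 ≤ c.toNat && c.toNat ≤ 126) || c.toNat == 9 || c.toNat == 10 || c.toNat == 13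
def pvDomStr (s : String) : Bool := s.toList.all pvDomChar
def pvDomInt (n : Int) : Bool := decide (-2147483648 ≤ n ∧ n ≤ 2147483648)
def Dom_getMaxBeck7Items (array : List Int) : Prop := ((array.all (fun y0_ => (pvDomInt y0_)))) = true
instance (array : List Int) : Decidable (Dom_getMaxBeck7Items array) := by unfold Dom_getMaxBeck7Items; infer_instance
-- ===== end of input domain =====

-- B replaces A's index-stepped loop with a combined running-max/mapped-index inner scan per
-- 7-item group by one flat pass accumulating a 7-item buffer, flushing each full (and the
-- trailing partial) buffer through max() then .index(); same O(n) cost (objective: alternative).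


-- ===== PORT A =====
def getMaxBeck7Items (array : List Int) : List Int :=
  let results_beck : List Int := [0, 1, 1, 2, 2, 3, 3]
  (PySem.List.pyRange 0 (array.length : Int) 7).foldl
    (fun results index =>
      let item := PySem.List.slice array (some index) (some (index + 7))
      let st := (PySem.List.enumerate item).foldl
        (fun (st : Int × Int) (p : Int × Int) =>
          if p.2 > st.1 then (p.2, PySem.List.pyGetD results_beck p.1 0) else st)
        (0, 0)
      results ++ [st.2])
    []

-- ===== PORT B =====
-- helper _score: mapped value of one nonempty group
def pvScore (group : List Int) : Int :=
  let results_beck : List Int := [0, 1, 1, 2, 2, 3, 3]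
  let m := (PySem.List.max? group (fun y => y)).getD 0
  if 0 < m then
    PySem.List.pyGetD results_beck (((PySem.List.index? group m).getD 0 : Nat) : Int) 0
  else 0

def getMaxBeck7Items_alt (array : List Int) : List Int :=
  let st := array.foldl
    (fun (st : List Int × List Int) (value : Int) =>
      let group := st.1 ++ [value]
      if group.length = 7 then (([] : List Int), st.2 ++ [pvScore group])
      else (group, st.2))
    ([], [])
  if st.1 = [] then st.2 else st.2 ++ [pvScore st.1]

-- ===== PRECONDITION & SPEC =====
def Spec_getMaxBeck7Items (array : List Int) (out : List Int) : Prop := out = getMaxBeck7Items_alt array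
instance (array : List Int) (out : List Int) : Decidable (Spec_getMaxBeck7Items array out) := by unfold Spec_getMaxBeck7Items; infer_instance

-- ===== CLAIM (what is proved, stated in full; the proofs are below) =====
def Claim_equal_getMaxBeck7Items : Prop := ∀ (array : List Int), Dom_getMaxBeck7Items array → Spec_getMaxBeck7Items array (getMaxBeck7Items array)

-- ===== LEMMAS AND PROOFS =====

-- the value A's inner loop produces for one 7-item chunk
def chunkValA (item : List Int) : Int :=
  ((PySem.List.enumerate item).foldl
    (fun (st : Int × Int) (p : Int × Int) =>
      if p.2 > st.1 then (p.2, PySem.List.pyGetD ([0, 1, 1, 2, 2, 3, 3] : List Int) p.1 0) else st)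
    (0, 0)).2

lemma foldl_max_mem (t : List Int) (a : Int) : t.foldl max a = a ∨ t.foldl max a ∈ t := by
  induction t generalizing a with
  | nil => left; rfl
  | cons x s ih =>
    rcases ih (max a x) with h | h
    · by_cases hax : x ≤ a
      · left; simp only [List.foldl_cons, h]; omega
      · right
        have hx : max a x = x := max_eq_right (by omega)
        rw [hx] at h
        simp [List.foldl_cons, hx, h]
    · right; simp only [List.foldl_cons, List.mem_cons]; exact Or.inr h

lemma le_foldl_max' (t : List Int) (a : Int) : a ≤ t.foldl max a := by
  induction t generalizing a with
  | nil => simp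
  | cons x s ih => exact le_trans (le_max_left a x) (ih (max a x))

lemma foldl_max_init (t : List Int) (a b : Int) :
    t.foldl max (max a b) = max a (t.foldl max b) := by
  induction t generalizing b with
  | nil => rfl
  | cons x s ih => simp only [List.foldl_cons, max_assoc, ih]

-- A's inner running-max fold, characterised: the running max, and f applied to the
-- first index at which that max (when it exceeds the initial mayor) first occurs.
lemma innerFold (item : List Int) (f : Int → Int) (s mayor idx : Int) :
    (PySem.List.enumerate item s).foldl
        (fun (st : Int × Int) (p : Int × Int) =>
          if p.2 > st.1 then (p.2, f p.1) else st) (mayor, idx)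
      = (item.foldl max mayor,
         if mayor < item.foldl max mayor then
           f (s + (((PySem.List.index? item (item.foldl max mayor)).getD 0 : Nat) : Int))
         else idx) := by
  induction item generalizing s mayor idx with
  | nil => simp [PySem.List.enumerate_nil]
  | cons x t ih =>
    rw [PySem.List.enumerate_cons]
    simp only [List.foldl_cons]
    by_cases hx : x > mayor
    · rw [if_pos hx, ih]
      have hmx : max mayor x = x := max_eq_right (le_of_lt hx)
      rw [hmx]
      have hxle : x ≤ t.foldl max x := le_foldl_max' t x
      have hlt : mayor < t.foldl max x := lt_of_lt_of_le hx hxle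
      rw [if_pos hlt]
      by_cases heq : x = t.foldl max x
      · -- the head is the maximum: index 0, the inner loop never updates again
        rw [if_neg (by omega)]
        rw [← heq, PySem.List.index?_cons_self]
        simp
      · have hxlt : x < t.foldl max x := lt_of_le_of_ne hxle heq
        rw [if_pos hxlt]
        have hmem : t.foldl max x ∈ t := by
          rcases foldl_max_mem t x with h | h
          · exact absurd h.symm heq
          · exact h
        obtain ⟨k, hk⟩ := Option.isSome_iff_exists.mp
          ((PySem.List.index?_isSome_iff t _).mpr hmem)
        rw [PySem.List.index?_cons_of_ne t heq, hk]
        simp only [Option.map_some, Option.getD_some]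
        refine congrArg₂ _ rfl (congrArg f ?_)
        push_cast
        ring
    · rw [if_neg hx, ih]
      have hmx : max mayor x = mayor := max_eq_left (by omega)
      rw [hmx]
      by_cases hlt : mayor < t.foldl max mayor
      · rw [if_pos hlt, if_pos hlt]
        have hne : x ≠ t.foldl max mayor := by omega
        have hmem : t.foldl max mayor ∈ t := by
          rcases foldl_max_mem t mayor with h | h
          · omega
          · exact h
        obtain ⟨k, hk⟩ := Option.isSome_iff_exists.mp
          ((PySem.List.index?_isSome_iff t _).mpr hmem)
        rw [PySem.List.index?_cons_of_ne t hne, hk]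
        simp only [Option.map_some, Option.getD_some]
        refine congrArg₂ _ rfl (congrArg f ?_)
        push_cast
        ring
      · rw [if_neg hlt, if_neg hlt]

-- one chunk: A's combined loop = B's max-then-index computation
lemma chunkVal_eq (x : Int) (t : List Int) :
    chunkValA (x :: t) = pvScore (x :: t) := by
  unfold chunkValA pvScore
  rw [innerFold (x :: t) (fun i => PySem.List.pyGetD ([0, 1, 1, 2, 2, 3, 3] : List Int) i 0) 0 0 0]
  rw [PySem.List.max?_id_cons]
  simp only [Option.getD_some]
  have hM : (x :: t).foldl max 0 = max 0 (t.foldl max x) := by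
    simp only [List.foldl_cons]
    exact foldl_max_init t 0 x
  by_cases hm : 0 < t.foldl max x
  · have h1 : (x :: t).foldl max 0 = t.foldl max x := by
      rw [hM]; exact max_eq_right (le_of_lt hm)
    simp only [h1]
    rw [if_pos hm, if_pos hm]
    simp
  · have h1 : (x :: t).foldl max 0 = 0 := by
      rw [hM]; exact max_eq_left (by omega)
    simp only [h1]
    rw [if_neg hm, if_neg (lt_irrefl 0)]

-- proof-side chunked recursion: groups of 7, scored by pvScore
def chunkRec : List Int → List Int
  | [] => []
  | x :: t => pvScore ((x :: t).take 7) :: chunkRec ((x :: t).drop 7)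
  termination_by xs => xs.length
  decreasing_by simp

-- range(0, n, 7) peels its first index
lemma pyRange7_cons (n : Int) (h : 0 < n) :
    PySem.List.pyRange 0 n 7 = 0 :: (PySem.List.pyRange 0 (n - 7) 7).map (· + 7) := by
  rw [PySem.List.pyRange_of_pos _ _ (by norm_num), PySem.List.pyRange_of_pos _ _ (by norm_num)]
  have hc : (if (0:Int) < n then ((n - 0 + 7 - 1) / 7).toNat else 0)
      = (if (0:Int) < n - 7 then ((n - 7 - 0 + 7 - 1) / 7).toNat else 0) + 1 := by
    split_ifs <;> omega
  rw [hc, List.range_succ_eq_map]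
  simp only [List.map_cons, List.map_map]
  refine congrArg₂ _ (by norm_num) (List.map_congr_left ?_)
  intro k _
  simp only [Function.comp_apply]
  push_cast
  ring

-- empty range when the bound is nonpositive
lemma pyRange7_nil (n : Int) (h : n ≤ 0) : PySem.List.pyRange 0 n 7 = [] := by
  rw [PySem.List.pyRange_of_pos _ _ (by norm_num)]
  rw [if_neg (by omega)]
  simp

-- casting the chunk-count bound through Nat subtraction
lemma pyRange7_cast (m : Nat) :
    PySem.List.pyRange 0 ((m : Int) - 7) 7 = PySem.List.pyRange 0 (((m - 7 : Nat) : Int)) 7 := by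
  rw [PySem.List.pyRange_of_pos _ _ (by norm_num), PySem.List.pyRange_of_pos _ _ (by norm_num)]
  have hc : (if (0:Int) < (m : Int) - 7 then (((m : Int) - 7 - 0 + 7 - 1) / 7).toNat else 0)
      = (if (0:Int) < ((m - 7 : Nat) : Int) then ((((m - 7 : Nat) : Int) - 0 + 7 - 1) / 7).toNat else 0) := by
    split_ifs <;> omega
  rw [hc]

-- xs[j:j+7] as drop/take, Nat index
lemma slice_chunk (l : List Int) (j : Nat) :
    PySem.List.slice l (some (j : Int)) (some ((j : Int) + 7)) = (l.drop j).take 7 := by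
  simpa using PySem.List.slice_natCast_add l j 7

lemma A_eq_map (array : List Int) :
    getMaxBeck7Items array
      = (PySem.List.pyRange 0 (array.length : Int) 7).map
          (fun i => chunkValA (PySem.List.slice array (some i) (some (i + 7)))) := by
  unfold getMaxBeck7Items chunkValA
  rw [PySem.List.foldl_append_singleton_eq_map]
  simp

lemma main_eq : ∀ (n : Nat) (array : List Int), array.length = n →
    (PySem.List.pyRange 0 (array.length : Int) 7).map
        (fun i => chunkValA (PySem.List.slice array (some i) (some (i + 7))))
      = chunkRec array := by
  intro n
  induction n using Nat.strong_induction_on with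
  | _ n ih =>
    intro array hlen
    match array with
    | [] =>
      rw [pyRange7_nil _ (by simp)]
      simp [chunkRec]
    | x :: t =>
      have hpos : (0 : Int) < ((x :: t).length : Int) := by
        exact_mod_cast t.length.succ_pos
      rw [pyRange7_cons _ hpos, List.map_cons, List.map_map]
      rw [chunkRec]
      congr 1
      · -- heads
        have h0 : PySem.List.slice (x :: t) (some 0) (some (0 + 7)) = x :: t.take 6 := by
          have := slice_chunk (x :: t) 0
          simpa using this
        have h7 : (x :: t).take 7 = x :: t.take 6 := rfl
        rw [h0, h7, chunkVal_eq x (t.take 6)]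
      · -- tails
        have hdl : ((x :: t).drop 7).length = (x :: t).length - 7 := List.length_drop
        have hr : (PySem.List.pyRange 0 (((x :: t).length : Int) - 7) 7)
            = PySem.List.pyRange 0 ((((x :: t).drop 7).length : Int)) 7 := by
          rw [hdl]
          exact pyRange7_cast (x :: t).length
        rw [hr]
        rw [← ih ((x :: t).length - 7) (by omega) ((x :: t).drop 7) hdl]
        apply List.map_congr_left
        intro j hj
        have hj0 : 0 ≤ j := ((PySem.List.mem_pyRange_iff_of_pos (by norm_num) j).mp hj).1
        obtain ⟨jn, rfl⟩ : ∃ jn : Nat, j = (jn : Int) := ⟨j.toNat, (Int.toNat_of_nonneg hj0).symm⟩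
        simp only [Function.comp_apply]
        have h1 : PySem.List.slice (x :: t) (some ((jn : Int) + 7)) (some ((jn : Int) + 7 + 7))
            = ((x :: t).drop (jn + 7)).take 7 := by
          have := slice_chunk (x :: t) (jn + 7)
          push_cast at this
          convert this using 3
        rw [h1, slice_chunk ((x :: t).drop 7) jn]
        rw [List.drop_drop, Nat.add_comm 7 jn]

-- B's buffered single pass, with any partially filled buffer and accumulated output,
-- finishes as the chunked recursion of the remaining elements
lemma fold_eq_chunkRec : ∀ (array group results : List Int), group.length < 7 →
    (let st := array.foldl
        (fun (st : List Int × List Int) (value : Int) =>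
          let group := st.1 ++ [value]
          if group.length = 7 then (([] : List Int), st.2 ++ [pvScore group])
          else (group, st.2))
        (group, results)
     if st.1 = [] then st.2 else st.2 ++ [pvScore st.1])
      = results ++ chunkRec (group ++ array) := by
  intro array
  induction array with
  | nil =>
    intro group results hlt
    match group with
    | [] => simp [chunkRec]
    | g :: gs =>
      simp only [List.foldl_nil, List.append_nil]
      rw [if_neg (by simp)]
      rw [chunkRec]
      have ht : (g :: gs).take 7 = g :: gs := List.take_of_length_le (by omega)
      have hd : (g :: gs).drop 7 = [] := List.drop_eq_nil_of_le (by omega)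
      rw [ht, hd]
      simp [chunkRec]
  | cons v rest ih =>
    intro group results hlt
    simp only [List.foldl_cons]
    by_cases h7 : (group ++ [v]).length = 7
    · rw [if_pos h7]
      rw [ih [] (results ++ [pvScore (group ++ [v])]) (by norm_num)]
      have hsplit : group ++ v :: rest = (group ++ [v]) ++ rest := by simp
      rw [hsplit]
      obtain ⟨g, gs, hgg⟩ : ∃ g gs, group ++ [v] = g :: gs := by
        match group with
        | [] => exact ⟨v, [], rfl⟩
        | a :: as => exact ⟨a, as ++ [v], by simp⟩
      rw [hgg]
      have hgl : (g :: gs).length = 7 := by rw [← hgg]; exact h7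
      have hcons : (g :: gs) ++ rest = g :: (gs ++ rest) := rfl
      rw [hcons, chunkRec]
      have ht : List.take 7 (g :: (gs ++ rest)) = g :: gs := by
        rw [show g :: (gs ++ rest) = (g :: gs) ++ rest from rfl]
        exact List.take_left' hgl
      have hd : List.drop 7 (g :: (gs ++ rest)) = rest := by
        rw [show g :: (gs ++ rest) = (g :: gs) ++ rest from rfl]
        exact List.drop_left' hgl
      rw [ht, hd]
      simp
    · rw [if_neg h7]
      have hlt' : (group ++ [v]).length < 7 := by
        simp only [List.length_append, List.length_cons, List.length_nil] at *
        omega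
      rw [ih (group ++ [v]) results hlt']
      congr 2
      simp

lemma alt_eq_chunkRec (array : List Int) : getMaxBeck7Items_alt array = chunkRec array := by
  unfold getMaxBeck7Items_alt
  have := fold_eq_chunkRec array [] [] (by norm_num)
  simpa using this

-- ===== VERDICT (by name: the statement is the Claim_ definition above) =====
theorem getMaxBeck7Items_spec : Claim_equal_getMaxBeck7Items := by
  intro array _
  unfold Spec_getMaxBeck7Items
  rw [A_eq_map, main_eq array.length array rfl, alt_eq_chunkRec]
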